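-- pv_equiv track=rewrite | github.com/navis-org/navis | navis/utils/nameutils.py | __guess_sentiment
-- ===== SOURCE A (Python) =====
-- def __guess_sentiment(x):
--     """ Tries to classify a list of words into either <type>, <nickname>,
--     <tracer> or <generic> annotations.
--     """
--
--     sent = []
--     for i, w in enumerate(x):
--         # If word is a number, it's most likely something generic
--         if w.isdigit():
--             sent.append('generic')
--         elif w == 'neuron':
--             # If there is a lonely "neuron" followed by a number, it's generic
--             if i != len(x) and x[i + 1].isdigit():
--                 sent.append('generic')
--             # If not, it's probably type
--             else:
--                 sent.append('type')
--         # If there is a short, all upper case word after the generic information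
--         elif w.isupper() and len(w) > 1 and w.isalpha() and 'generic' in sent:
--             # If there is no number in that word, it's probably tracer initials
--             sent.append('tracer')
--         else:
--             # If the word is AFTER the generic number, it's probably a nickname
--             if 'generic' in sent:
--                 sent.append('nickname')
--             # If not, it's likely type information
--             else:
--                 sent.append('type')
--
--     return sent
-- ===== SOURCE B (Python) =====
-- def __guess_sentiment(x):
--     """Classify words into type/nickname/tracer/generic (two-pass index-pivot rewrite)."""
--     n = len(x)
--
--     def generic_at(i):
--         w = x[i]
--         return w.isdigit() or (w == 'neuron' and i + 1 < n and x[i + 1].isdigit())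
--
--     first_gen = next((i for i in range(n) if generic_at(i)), n)
--
--     def label(i, w):
--         if w.isdigit():
--             return 'generic'
--         if w == 'neuron':
--             return 'generic' if i + 1 < n and x[i + 1].isdigit() else 'type'
--         if i > first_gen and w.isupper() and len(w) > 1 and w.isalpha():
--             return 'tracer'
--         if i > first_gen:
--             return 'nickname'
--         return 'type'
--
--     return [label(i, w) for i, w in enumerate(x)]
-- ===== Notes on version B (the rewrite author's own statement) =====
-- stated objective: faster
-- what changed: Replaces A's single pass that appends to `sent` and re-scans that growing list with `'generic' in sent` at every word by a two-pass index-pivot scheme: a first pass finds the index of the first generic word, a second pass labels each word by comparing its index with that pivot.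
-- outside the precondition, e.g. on __guess_sentiment(['neuron']): A raises IndexError, B returns ['type']
import Mathlib
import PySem

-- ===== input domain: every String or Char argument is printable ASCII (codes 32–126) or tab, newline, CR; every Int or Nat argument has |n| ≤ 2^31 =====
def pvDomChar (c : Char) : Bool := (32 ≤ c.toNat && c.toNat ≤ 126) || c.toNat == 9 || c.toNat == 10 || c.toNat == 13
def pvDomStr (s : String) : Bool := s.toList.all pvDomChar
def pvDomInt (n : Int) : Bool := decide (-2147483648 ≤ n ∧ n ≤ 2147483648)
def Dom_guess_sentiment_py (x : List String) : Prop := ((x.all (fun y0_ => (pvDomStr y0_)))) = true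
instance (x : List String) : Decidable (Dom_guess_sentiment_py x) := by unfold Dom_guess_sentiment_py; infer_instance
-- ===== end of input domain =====

-- B replaces A's growing-list membership test ('generic' in sent) by a first pass that finds the
-- pivot index of the first generic word, then labels each word against that index (decomposition).

-- str.isupper(), ported by hand (PySem has only the char-level predicate): at least one cased
-- character and no lowercase one; exact on the printable-ASCII domain, where cased = letters.
def pvStrIsupper (s : String) : Bool :=
  s.toList.any PySem.Chars.isupper && s.toList.all (fun c => !PySem.Chars.islower c)

-- ===== PORT A =====
-- A's loop body: one label appended to `sent` per (index, word); x[i+1] is pyGet? (none = IndexError,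
-- reached only when the last word is 'neuron' — excluded by Pre_; getD "" stands for the raising case).
def pvStepA (x : List String) (sent : List String) (p : Int × String) : List String :=
  if PySem.Str.strIsdigit p.2 then sent ++ ["generic"]
  else if p.2 == "neuron" then
    (if decide (p.1 ≠ PySem.List.len x) &&
        PySem.Str.strIsdigit ((PySem.List.pyGet? x (p.1 + 1)).getD "") then sent ++ ["generic"]
     else sent ++ ["type"])
  else if pvStrIsupper p.2 && decide (PySem.Str.len p.2 > 1) && PySem.Str.strIsalpha p.2 &&
          sent.contains "generic" then sent ++ ["tracer"]
  else if sent.contains "generic" then sent ++ ["nickname"]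
  else sent ++ ["type"]

def guess_sentiment_py (x : List String) : List String :=
  (PySem.List.enumerate x).foldl (pvStepA x) []

-- ===== PORT B =====
-- B's generic_at(i)
def pvCondAt (x : List String) (n : Int) (i : Int) : Bool :=
  let w := (PySem.List.pyGet? x i).getD ""
  PySem.Str.strIsdigit w ||
    (w == "neuron" && decide (i + 1 < n) &&
     PySem.Str.strIsdigit ((PySem.List.pyGet? x (i + 1)).getD ""))

-- B's first_gen = next((i for i in range(n) if generic_at(i)), n)
def pvFirstGen (x : List String) : Int :=
  let n := PySem.List.len x
  match (PySem.List.pyRange 0 n 1).find? (pvCondAt x n) with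
  | some i => i
  | none => n

-- B's label(i, w)
def pvLabelB (x : List String) (n fg : Int) (i : Int) (w : String) : String :=
  if PySem.Str.strIsdigit w then "generic"
  else if w == "neuron" then
    (if decide (i + 1 < n) &&
        PySem.Str.strIsdigit ((PySem.List.pyGet? x (i + 1)).getD "") then "generic" else "type")
  else if decide (i > fg) && pvStrIsupper w && decide (PySem.Str.len w > 1) &&
          PySem.Str.strIsalpha w then "tracer"
  else if i > fg then "nickname"
  else "type"

def guess_sentiment_py_alt (x : List String) : List String :=
  let n := PySem.List.len x
  let fg := pvFirstGen x
  (PySem.List.enumerate x).map (fun p => pvLabelB x n fg p.1 p.2)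

-- ===== PRECONDITION & SPEC =====
-- Pre_ excludes exactly the inputs whose last word is 'neuron': there A evaluates x[i+1] past the end
-- and raises IndexError (it returns on everything else).
def Pre_guess_sentiment_py (x : List String) : Prop := x.getLast? ≠ some "neuron"
instance (x : List String) : Decidable (Pre_guess_sentiment_py x) := by
  unfold Pre_guess_sentiment_py; infer_instance
def pvWitness_guess_sentiment_py : List String := ["neuron", "7", "AB"]

def Spec_guess_sentiment_py (x : List String) (out : List String) : Prop := out = guess_sentiment_py_alt x
instance (x : List String) (out : List String) : Decidable (Spec_guess_sentiment_py x out) := by unfold Spec_guess_sentiment_py; infer_instance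

-- ===== CLAIM (what is proved, stated in full; the proofs are below) =====
def Claim_equal_guess_sentiment_py : Prop := ∀ (x : List String), Dom_guess_sentiment_py x → Pre_guess_sentiment_py x → Spec_guess_sentiment_py x (guess_sentiment_py x)


-- ===== LEMMAS AND PROOFS =====

-- B's first pass, seen through List.range
def pvP (x : List String) (j : Nat) : Bool := pvCondAt x (x.length : Int) (j : Int)

lemma pvFirstGen_eq (x : List String) :
    pvFirstGen x = (match (List.range x.length).find? (pvP x) with
      | some j => (j : Int)
      | none => (x.length : Int)) := by
  have h1 : (PySem.List.pyRange 0 ((x.length : Int)) 1).find? (pvCondAt x (x.length : Int))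
      = ((List.range x.length).find? (pvP x)).map (fun (j : Nat) => (j : Int)) := by
    rw [PySem.List.pyRange_zero_natCast, List.find?_map]
    rfl
  simp only [pvFirstGen, PySem.List.len_eq, h1]
  rcases h : (List.range x.length).find? (pvP x) with _ | j <;> simp

lemma pvFirstGen_nonneg (x : List String) : 0 ≤ pvFirstGen x := by
  rw [pvFirstGen_eq]
  rcases h : (List.range x.length).find? (pvP x) with _ | j <;> simp

-- find? over List.range finds the first index satisfying p (or none)
lemma pvRangeFind?_spec (p : Nat → Bool) (n : Nat) :
    (∀ j, (List.range n).find? p = some j → j < n ∧ p j = true ∧ ∀ i < j, p i = false) ∧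
    ((List.range n).find? p = none → ∀ i < n, p i = false) := by
  induction n with
  | zero => simp
  | succ n ih =>
    rw [List.range_succ, List.find?_append]
    rcases h : (List.range n).find? p with _ | j
    · obtain ⟨_, ih2⟩ := ih
      constructor
      · intro j hj
        simp at hj
        obtain ⟨hpn, rfl⟩ := hj
        exact ⟨by omega, hpn, fun i hi => ih2 h i hi⟩
      · intro hnone i hi
        simp at hnone
        rcases Nat.lt_succ_iff_lt_or_eq.mp hi with h' | rfl
        · exact ih2 h i h'
        · exact hnone
    · obtain ⟨ih1, _⟩ := ih
      constructor
      · intro j' hj'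
        simp at hj'
        obtain ⟨hjn, hpj, hmin⟩ := ih1 j h
        cases hj'
        exact ⟨by omega, hpj, hmin⟩
      · intro hc; simp at hc

-- the step invariant: 'generic' has appeared among indices ≤ k iff pvFirstGen ≤ k
lemma pvFirstGen_step (x : List String) (k : Nat) (hk : k < x.length) :
    (decide (pvFirstGen x < (k : Int)) || pvCondAt x (x.length : Int) (k : Int))
      = decide (pvFirstGen x ≤ (k : Int)) := by
  have hspec := pvRangeFind?_spec (pvP x) x.length
  rw [pvFirstGen_eq]
  rcases h : (List.range x.length).find? (pvP x) with _ | j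
  · have hc : pvP x k = false := hspec.2 h k hk
    simp only [pvP] at hc
    simp [hc]
    omega
  · obtain ⟨hjn, hpj, hmin⟩ := hspec.1 j h
    by_cases hjk : j < k
    · simp [show ((j : Int) < (k : Int)) from by exact_mod_cast hjk,
            show ((j : Int) ≤ (k : Int)) from by exact_mod_cast Nat.le_of_lt hjk]
    · by_cases hje : j = k
      · subst hje
        have : pvCondAt x (x.length : Int) (j : Int) = true := hpj
        simp [this]
      · have hkj : k < j := by omega
        have hc : pvP x k = false := hmin k hkj
        simp only [pvP] at hc
        simp [hc]
        omega

-- A's step appends exactly B's label (under the membership invariant)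
lemma pvStep_eq_label (x : List String) (fg : Int) (k : Nat) (w : String) (sent : List String)
    (hk : k < x.length)
    (hs : sent.contains "generic" = decide (fg < (k : Int))) :
    pvStepA x sent ((k : Int), w) = sent ++ [pvLabelB x (x.length : Int) fg (k : Int) w] := by
  have hget : PySem.List.pyGet? x ((k : Int) + 1) = x[k+1]? := by
    simp only [show ((k : Int) + 1) = ((k + 1 : Nat) : Int) from by push_cast; ring,
      PySem.List.pyGet?_natCast]
  have hcond : (decide ((k : Int) ≠ PySem.List.len x) &&
        PySem.Str.strIsdigit ((PySem.List.pyGet? x ((k : Int) + 1)).getD ""))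
      = (decide ((k : Int) + 1 < (x.length : Int)) &&
        PySem.Str.strIsdigit ((PySem.List.pyGet? x ((k : Int) + 1)).getD "")) := by
    by_cases h1 : k + 1 < x.length
    · have h0 : (decide ((k : Int) ≠ PySem.List.len x)) = true := by
        simp [PySem.List.len_eq]; omega
      have h2 : (decide ((k : Int) + 1 < (x.length : Int))) = true := by
        simp; omega
      rw [h0, h2]
    · have hD : PySem.Str.strIsdigit ((PySem.List.pyGet? x ((k : Int) + 1)).getD "") = false := by
        rw [hget]
        have : x[k+1]? = none := by
          rw [List.getElem?_eq_none_iff]; omega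
        rw [this]
        rfl
      have h2 : (decide ((k : Int) + 1 < (x.length : Int))) = false := by
        simp; omega
      rw [hD, h2]
      simp
  have hgt : (decide ((k : Int) > fg)) = decide (fg < (k : Int)) := rfl
  simp only [pvStepA, pvLabelB]
  rw [hcond, hs, hgt]
  split_ifs <;> simp_all
  all_goals omega

-- B's label is 'generic' exactly on B's first-pass condition
lemma pvLabel_generic (x : List String) (fg : Int) (k : Nat) (w : String)
    (hw : x[k]? = some w) :
    (pvLabelB x (x.length : Int) fg (k : Int) w == "generic")
      = pvCondAt x (x.length : Int) (k : Int) := by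
  have hw' : (PySem.List.pyGet? x (k : Int)).getD "" = w := by simp [hw]
  simp only [pvLabelB, pvCondAt, hw']
  split_ifs <;> simp_all

lemma pvMain (x : List String) : ∀ (xs : List String) (k : Nat) (sent : List String),
    x.drop k = xs →
    sent.contains "generic" = decide (pvFirstGen x < (k : Int)) →
    (PySem.List.enumerate xs (k : Int)).foldl (pvStepA x) sent
      = sent ++ (PySem.List.enumerate xs (k : Int)).map
          (fun p => pvLabelB x (x.length : Int) (pvFirstGen x) p.1 p.2) := by
  intro xs
  induction xs with
  | nil => intro k sent _ _; simp [PySem.List.enumerate]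
  | cons w xs' ih =>
    intro k sent hd hs
    have hk : k < x.length := by
      by_contra h
      rw [List.drop_eq_nil_iff.mpr (by omega)] at hd
      exact List.cons_ne_nil _ _ hd.symm
    have hw : x[k]? = some w := by
      rw [← List.head?_drop, hd]
      rfl
    have hd' : x.drop (k + 1) = xs' := by
      have : List.drop 1 (List.drop k x) = List.drop (k + 1) x := by
        rw [List.drop_drop]
      rw [← this, hd]
      rfl
    rw [PySem.List.enumerate_cons]
    simp only [List.foldl_cons, List.map_cons]
    rw [pvStep_eq_label x (pvFirstGen x) k w sent hk hs]
    have hcast : ((k : Int) + 1) = ((k + 1 : Nat) : Int) := by push_cast; ring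
    have hs' : (sent ++ [pvLabelB x (x.length : Int) (pvFirstGen x) (k : Int) w]).contains "generic"
        = decide (pvFirstGen x < ((k + 1 : Nat) : Int)) := by
      rw [List.contains_append, hs]
      have hlab : ([pvLabelB x (x.length : Int) (pvFirstGen x) (k : Int) w] : List String).contains "generic"
          = pvCondAt x (x.length : Int) (k : Int) := by
        simp only [List.contains_cons, List.contains_nil, Bool.or_false]
        rw [← pvLabel_generic x (pvFirstGen x) k w hw]
        cases h2 : (pvLabelB x (x.length : Int) (pvFirstGen x) (k : Int) w == "generic") <;>
          simp_all [BEq.comm]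
      rw [hlab, pvFirstGen_step x k hk]
      by_cases hle : pvFirstGen x ≤ (k : Int)
      · simp only [hle, decide_true]
        symm
        simp
        omega
      · simp only [hle, decide_false]
        symm
        simp
        omega
    rw [hcast, ih (k + 1) _ hd' hs']
    simp

-- ===== VERDICT (by name: the statement is the Claim_ definition above) =====
theorem guess_sentiment_py_spec : Claim_equal_guess_sentiment_py := by
  intro x _ _
  unfold Spec_guess_sentiment_py guess_sentiment_py guess_sentiment_py_alt
  have h := pvMain x x 0 [] (by simp) (by
    simp only [List.contains, Nat.cast_zero]
    have := pvFirstGen_nonneg x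
    simp [List.elem]
    omega)
  simpa [PySem.List.len_eq] using h
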